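-- pv_equiv track=rewrite | github.com/tommygood/TestWeb | classroom.py | loc
-- ===== SOURCE A (Python) =====
-- def loc(n): #從1開始的地圖
--     mp = []  #mp = 從1開始的地圖
--     for i in range(n):
--         num = [] #每一列的數字
--         for k in range(n):
--             num.append(k+i*n) #第一個數字會是要*n
--         mp.append(num) #加起來
--     return mp
-- ===== SOURCE B (Python) =====
-- def loc(n):
--     if n <= 0:
--         return []
--     flat = list(range(n * n))
--     return [flat[i * n:(i + 1) * n] for i in range(n)]
-- ===== Notes on version B (the rewrite author's own statement) =====
-- stated objective: alternative
-- what changed: Replaces the nested per-element loops computing k+i*n with building the flat row-major sequence once via range(n*n) and reshaping it into rows by slicing.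
import Mathlib
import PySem

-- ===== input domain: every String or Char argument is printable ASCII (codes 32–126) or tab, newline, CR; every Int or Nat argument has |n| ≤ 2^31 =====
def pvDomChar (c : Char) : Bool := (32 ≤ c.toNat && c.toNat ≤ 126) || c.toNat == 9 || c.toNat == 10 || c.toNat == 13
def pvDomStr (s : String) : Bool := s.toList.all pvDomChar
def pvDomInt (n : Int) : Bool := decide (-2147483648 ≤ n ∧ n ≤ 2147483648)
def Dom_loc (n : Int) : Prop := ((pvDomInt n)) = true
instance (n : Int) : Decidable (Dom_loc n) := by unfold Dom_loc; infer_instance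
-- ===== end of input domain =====

-- B builds the flat row-major sequence range(n*n) once and reshapes it into rows by slicing (alternative decomposition, same cost).

-- ===== PORT A =====
def loc (n : Int) : List (List Int) :=
  (PySem.List.pyRange 0 n 1).foldl
    (fun mp i =>
      mp ++ [(PySem.List.pyRange 0 n 1).foldl (fun num k => num ++ [k + i * n]) []])
    []

-- ===== PORT B =====
def loc_alt (n : Int) : List (List Int) :=
  if n ≤ 0 then []
  else
    let flat := PySem.List.pyRange 0 (n * n) 1
    (PySem.List.pyRange 0 n 1).map
      (fun i => PySem.List.slice flat (some (i * n)) (some ((i + 1) * n)))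

-- ===== PRECONDITION & SPEC =====
def Spec_loc (n : Int) (out : List (List Int)) : Prop := out = loc_alt n
instance (n : Int) (out : List (List Int)) : Decidable (Spec_loc n out) := by unfold Spec_loc; infer_instance

-- ===== CLAIM (what is proved, stated in full; the proofs are below) =====
def Claim_equal_loc : Prop := ∀ (n : Int), Dom_loc n → Spec_loc n (loc n)

-- ===== LEMMAS AND PROOFS =====

-- slicing the flat range [i*n, (i+1)*n) extracts exactly that sub-range
lemma slice_flat (n i : Int) (h0 : 0 ≤ i) (h1 : i < n) :
    PySem.List.slice (PySem.List.pyRange 0 (n * n) 1) (some (i * n)) (some ((i + 1) * n))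
      = PySem.List.pyRange (i * n) ((i + 1) * n) 1 := by
  have hn : 0 ≤ n := le_of_lt (lt_of_le_of_lt h0 h1)
  have ha : (0 : Int) ≤ i * n := mul_nonneg h0 hn
  have hb : (i + 1) * n ≤ n * n := by nlinarith
  have hsplit : PySem.List.pyRange 0 (n * n) 1
      = PySem.List.pyRange 0 (i * n) 1 ++ PySem.List.pyRange (i * n) (n * n) 1 :=
    PySem.List.pyRange_one_append 0 (i * n) (n * n) ha (by nlinarith)
  have hsplit2 : PySem.List.pyRange (i * n) (n * n) 1
      = PySem.List.pyRange (i * n) ((i + 1) * n) 1 ++ PySem.List.pyRange ((i + 1) * n) (n * n) 1 :=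
    PySem.List.pyRange_one_append (i * n) ((i + 1) * n) (n * n) (by nlinarith) hb
  have hlen : ((PySem.List.pyRange 0 (n * n) 1).length : Int) = n * n := by
    rw [PySem.List.length_pyRange_one]
    have hnn : 0 ≤ n * n := mul_nonneg hn hn
    omega
  rw [PySem.List.slice_of_nonneg _ ha (by nlinarith) (by rw [hlen]; nlinarith) (by rw [hlen]; exact hb),
    hsplit, hsplit2, List.drop_append_of_le_length (by
      rw [PySem.List.length_pyRange_one]; omega)]
  rw [List.drop_of_length_le (by rw [PySem.List.length_pyRange_one]; omega)]
  simp only [List.nil_append]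
  rw [List.take_append_of_le_length (by rw [PySem.List.length_pyRange_one]; omega)]
  apply List.take_of_length_le
  rw [PySem.List.length_pyRange_one]
  omega

-- ===== VERDICT (by name: the statement is the Claim_ definition above) =====
theorem loc_spec : Claim_equal_loc := by
  intro n _
  show loc n = loc_alt n
  unfold loc loc_alt
  rw [PySem.List.foldl_append_singleton_eq_map]
  by_cases hn : n ≤ 0
  · simp [hn, PySem.List.pyRange_one_eq_nil hn]
  simp only [hn, if_false]
  apply List.map_congr_left
  intro i hi
  obtain ⟨h0, h1⟩ := (PySem.List.mem_pyRange_one).1 hi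
  rw [PySem.List.foldl_append_singleton_eq_map, slice_flat n i h0 h1,
    PySem.List.pyRange_one, PySem.List.pyRange_one]
  simp only [List.map_map]
  have : ((i + 1) * n - i * n).toNat = (n - 0).toNat := by
    congr 1; ring_nf
  rw [this]
  apply List.map_congr_left
  intro k _
  simp [Function.comp]
  ring
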